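-- pv_equiv track=rewrite | github.com/Logic-1729/CellAgent | test/gen_task_pairs.py | get_task_templates
-- ===== SOURCE A (Python) =====
-- import json, os, itertools
--
-- def get_task_templates(raw_template):
--     results = []
--     left_pos = 0
--     while True:
--         left = raw_template.find('(', left_pos)
--         if left == -1:
--             break
--         right = raw_template.find(')', left + 1)
--         if right == -1:
--             break
--
--         content = raw_template[left + 1: right]
--         contents = content.replace("NULL", "").split('|')
--
--         results.append({
--             'left': left,
--             'right': right,
--             'contents': contents
--         })
--
--         left_pos = right + 1
--     combinations = itertools.product(*[result['contents'] for result in results])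
--     task_templates = []
--     for combination in combinations:
--         segments = []
--         last_left = 0
--         for i, content in enumerate(combination):
--             left = results[i]['left']
--             right = results[i]['right']
--             segments.append(raw_template[last_left:left])
--             segments.append(content)
--             last_left = right + 1
--         segments.append(raw_template[last_left:])
--         task_templates.append(''.join(segments))
--     return task_templates
-- ===== SOURCE B (Python) =====
-- def get_task_templates(raw_template):
--     # single accumulating pass: expand partial templates group by group
--     partials = ['']
--     pos = 0
--     while True:
--         left = raw_template.find('(', pos)
--         if left == -1:
--             break
--         right = raw_template.find(')', left + 1)
--         if right == -1:
--             break
--         options = raw_template[left + 1: right].replace("NULL", "").split('|')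
--         partials = [p + raw_template[pos:left] + o for p in partials for o in options]
--         pos = right + 1
--     return [p + raw_template[pos:] for p in partials]
-- ===== Notes on version B (the rewrite author's own statement) =====
-- stated objective: alternative
-- what changed: B replaces A's three-phase pipeline (collect group dicts, itertools.product over option lists, rebuild each template from a segments list) with a single left-to-right pass that expands a list of partial template strings in place at each group.
import Mathlib
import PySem

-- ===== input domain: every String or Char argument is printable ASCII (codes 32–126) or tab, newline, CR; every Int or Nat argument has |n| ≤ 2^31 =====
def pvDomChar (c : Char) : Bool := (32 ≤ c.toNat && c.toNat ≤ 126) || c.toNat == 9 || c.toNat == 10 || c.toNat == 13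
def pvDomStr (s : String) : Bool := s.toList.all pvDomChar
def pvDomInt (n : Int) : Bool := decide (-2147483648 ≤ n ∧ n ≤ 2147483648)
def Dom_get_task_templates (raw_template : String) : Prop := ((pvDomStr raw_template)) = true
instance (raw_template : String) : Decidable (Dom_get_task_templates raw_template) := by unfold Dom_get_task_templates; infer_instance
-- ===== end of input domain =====

-- B replaces A's collect-groups + itertools.product + segment-reassembly with one accumulating
-- left-to-right pass that expands partial templates group by group (objective: alternative decomposition).

-- termination helpers (cited by the ports' decreasing_by)
theorem pv_findFrom_start_le (s sub : List Char) (k : Nat)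
    (h : PySem.Chars.findFrom s sub (k : Int) ≠ -1) : k ≤ s.length := by
  by_contra hk
  apply h
  simp only [PySem.Chars.findFrom]
  split_ifs with h1 h2 <;> first | rfl | omega

theorem pv_findFrom_le (s sub : List Char) (k : Nat)
    (h : PySem.Chars.findFrom s sub (k : Int) ≠ -1) :
    (k : Int) ≤ PySem.Chars.findFrom s sub (k : Int) := by
  exact (PySem.Chars.findFrom_natCast_spec s sub k (pv_findFrom_start_le s sub k h) h).1

-- contents of one group: raw[l+1:r].replace("NULL","").split('|')  (identical expression in A and B)
def pvContents (cs : List Char) (l r : Nat) : List (List Char) :=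
  PySem.Chars.splitOn
    (PySem.Chars.replace (PySem.List.slice cs (some ((l : Int) + 1)) (some (r : Int)))
      ['N','U','L','L'] []) ['|']

-- ===== PORT A =====
-- itertools.product (last factor varies fastest)
def pvProduct : List (List (List Char)) → List (List (List Char))
  | [] => [[]]
  | xs :: rest => xs.flatMap (fun x => (pvProduct rest).map (fun t => x :: t))

-- A's while-loop: collect (left, right, contents) of every group
def pvScanA (cs : List Char) (left_pos : Nat) : List (Nat × Nat × List (List Char)) :=
  let left := PySem.Chars.findFrom cs ['('] (left_pos : Int)
  if h1 : left = -1 then []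
  else
    let right := PySem.Chars.findFrom cs [')'] (left + 1)
    if h2 : right = -1 then []
    else
      (left.toNat, right.toNat, pvContents cs left.toNat right.toNat) ::
        pvScanA cs (right.toNat + 1)
termination_by cs.length + 1 - left_pos
decreasing_by
  have hk := pv_findFrom_start_le cs ['('] left_pos h1
  have hl := pv_findFrom_le cs ['('] left_pos h1
  have h2' : PySem.Chars.findFrom cs [')']
      ((((PySem.Chars.findFrom cs ['('] (left_pos : Int)).toNat + 1 : Nat)) : Int) ≠ -1 := by
    push_cast
    rw [show ((PySem.Chars.findFrom cs ['('] (left_pos : Int)).toNat : Int) =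
        PySem.Chars.findFrom cs ['('] (left_pos : Int) from by omega]
    exact h2
  have hr := pv_findFrom_le cs [')']
    ((PySem.Chars.findFrom cs ['('] (left_pos : Int)).toNat + 1) h2'
  rw [show PySem.Chars.findFrom cs ['('] (left_pos : Int) + 1 =
      ((((PySem.Chars.findFrom cs ['('] (left_pos : Int)).toNat + 1 : Nat)) : Int) from by omega]
  omega

-- A's reconstruction: the list 'segments' for one combination
def pvSegs (cs : List Char) (items : List ((Nat × Nat × List (List Char)) × List Char))
    (last_left : Nat) : List (List Char) :=
  match items with
  | [] => [cs.drop last_left]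
  | ((l, r, _), content) :: rest =>
      PySem.List.slice cs (some (last_left : Int)) (some (l : Int)) :: content ::
        pvSegs cs rest (r + 1)

def get_task_templates (raw_template : String) : List String :=
  let cs := raw_template.toList
  let results := pvScanA cs 0
  let combinations := pvProduct (results.map (fun g => g.2.2))
  combinations.map (fun comb => String.ofList (pvSegs cs (results.zip comb) 0).flatten)

-- ===== PORT B =====
-- B's while-loop: expand the list of partial templates group by group, then append the tail
def pvLoopB (cs : List Char) (pos : Nat) (partials : List (List Char)) : List (List Char) :=
  let left := PySem.Chars.findFrom cs ['('] (pos : Int)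
  if h1 : left = -1 then partials.map (fun p => p ++ cs.drop pos)
  else
    let right := PySem.Chars.findFrom cs [')'] (left + 1)
    if h2 : right = -1 then partials.map (fun p => p ++ cs.drop pos)
    else
      pvLoopB cs (right.toNat + 1)
        (partials.flatMap (fun p =>
          (pvContents cs left.toNat right.toNat).map (fun o =>
            (p ++ PySem.List.slice cs (some (pos : Int)) (some (left.toNat : Int))) ++ o)))
termination_by cs.length + 1 - pos
decreasing_by
  have hk := pv_findFrom_start_le cs ['('] pos h1
  have hl := pv_findFrom_le cs ['('] pos h1
  have h2' : PySem.Chars.findFrom cs [')']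
      ((((PySem.Chars.findFrom cs ['('] (pos : Int)).toNat + 1 : Nat)) : Int) ≠ -1 := by
    push_cast
    rw [show ((PySem.Chars.findFrom cs ['('] (pos : Int)).toNat : Int) =
        PySem.Chars.findFrom cs ['('] (pos : Int) from by omega]
    exact h2
  have hr := pv_findFrom_le cs [')']
    ((PySem.Chars.findFrom cs ['('] (pos : Int)).toNat + 1) h2'
  rw [show PySem.Chars.findFrom cs ['('] (pos : Int) + 1 =
      ((((PySem.Chars.findFrom cs ['('] (pos : Int)).toNat + 1 : Nat)) : Int) from by omega]
  omega

def get_task_templates_alt (raw_template : String) : List String :=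
  (pvLoopB raw_template.toList 0 [[]]).map String.ofList

-- ===== PRECONDITION & SPEC =====
def Spec_get_task_templates (raw_template : String) (out : List String) : Prop := out = get_task_templates_alt raw_template
instance (raw_template : String) (out : List String) : Decidable (Spec_get_task_templates raw_template out) := by unfold Spec_get_task_templates; infer_instance

-- ===== CLAIM (what is proved, stated in full; the proofs are below) =====
def Claim_equal_get_task_templates : Prop := ∀ (raw_template : String), Dom_get_task_templates raw_template → Spec_get_task_templates raw_template (get_task_templates raw_template)

-- ===== LEMMAS AND PROOFS =====

-- invariant: B's loop from pos, seeded with 'partials', produces exactly every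
-- partial ++ (A's reconstruction of the remaining groups scanned from pos)
theorem pvLoopB_eq (cs : List Char) :
    ∀ (n pos : Nat) (partials : List (List Char)), cs.length + 1 - pos ≤ n →
    pvLoopB cs pos partials =
      partials.flatMap (fun p =>
        (pvProduct ((pvScanA cs pos).map (fun g => g.2.2))).map (fun comb =>
          p ++ (pvSegs cs ((pvScanA cs pos).zip comb) pos).flatten)) := by
  intro n
  induction n with
  | zero =>
      intro pos partials hn
      rw [pvLoopB.eq_def, pvScanA.eq_def]
      have h1 : PySem.Chars.findFrom cs ['('] (pos : Int) = -1 := by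
        by_contra h
        have := pv_findFrom_start_le cs ['('] pos h
        omega
      simp [h1, pvProduct, pvSegs, ← List.map_eq_flatMap]
  | succ n ih =>
      intro pos partials hn
      rw [pvLoopB.eq_def, pvScanA.eq_def]
      by_cases h1 : PySem.Chars.findFrom cs ['('] (pos : Int) = -1
      · simp [h1, pvProduct, pvSegs, ← List.map_eq_flatMap]
      · by_cases h2 : PySem.Chars.findFrom cs [')']
            (PySem.Chars.findFrom cs ['('] (pos : Int) + 1) = -1
        · simp [h1, h2, pvProduct, pvSegs, ← List.map_eq_flatMap]
        · simp only [h1, h2, dite_false]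
          have hk := pv_findFrom_start_le cs ['('] pos h1
          have hl := pv_findFrom_le cs ['('] pos h1
          have h1' : PySem.Chars.findFrom cs ['('] (pos : Int) =
              ((PySem.Chars.findFrom cs ['('] (pos : Int)).toNat : Int) := by omega
          have h2' : PySem.Chars.findFrom cs [')']
              ((((PySem.Chars.findFrom cs ['('] (pos : Int)).toNat + 1 : Nat)) : Int) ≠ -1 := by
            push_cast
            rw [← h1']
            exact h2
          have hr := pv_findFrom_le cs [')']
            ((PySem.Chars.findFrom cs ['('] (pos : Int)).toNat + 1) h2'
          have hcast : PySem.Chars.findFrom cs [')'] (PySem.Chars.findFrom cs ['('] (pos : Int) + 1) =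
              PySem.Chars.findFrom cs [')'] ((((PySem.Chars.findFrom cs ['('] (pos : Int)).toNat + 1 : Nat)) : Int) := by
            rw [show PySem.Chars.findFrom cs ['('] (pos : Int) + 1 =
                ((((PySem.Chars.findFrom cs ['('] (pos : Int)).toNat + 1 : Nat)) : Int) from by omega]
          rw [ih _ _ (by rw [hcast]; omega)]
          simp [pvProduct, pvSegs, List.flatMap_map, List.map_flatMap,
            List.flatMap_assoc, List.map_map, Function.comp_def, List.zip_cons_cons,
            List.append_assoc]
  
-- ===== VERDICT (by name: the statement is the Claim_ definition above) =====
theorem get_task_templates_spec : Claim_equal_get_task_templates := by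
  intro raw _
  unfold Spec_get_task_templates get_task_templates get_task_templates_alt
  rw [pvLoopB_eq raw.toList (raw.toList.length + 1) 0 [[]] (by omega)]
  simp [List.flatMap, List.map_map, Function.comp]
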